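-- pv_equiv track=rewrite | github.com/anoubhav/LeetCode-Solutions | May_30_Day_Challenge/2 - Jewels and Stones.py | my_soln
-- ===== SOURCE A (Python) =====
-- from collections import Counter
--
-- def my_soln(J, S):
--     ans = 0
--     d = Counter(S)
--     for jewel in J:
--         try:
--             ans += d[jewel]
--         except:
--             continue
--     return(ans)
-- ===== SOURCE B (Python) =====
-- def my_soln(J, S):
--     return sum(J.count(c) * S.count(c) for c in set(J))
-- ===== Notes on version B (the rewrite author's own statement) =====
-- stated objective: alternative
-- what changed: B drops the Counter: it iterates over the distinct jewel characters (set(J)) and adds J.count(c) * S.count(c), grouping the sum by character value (multiplicity via multiplication) instead of counting one string and looking up while traversing the other.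
import Mathlib
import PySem

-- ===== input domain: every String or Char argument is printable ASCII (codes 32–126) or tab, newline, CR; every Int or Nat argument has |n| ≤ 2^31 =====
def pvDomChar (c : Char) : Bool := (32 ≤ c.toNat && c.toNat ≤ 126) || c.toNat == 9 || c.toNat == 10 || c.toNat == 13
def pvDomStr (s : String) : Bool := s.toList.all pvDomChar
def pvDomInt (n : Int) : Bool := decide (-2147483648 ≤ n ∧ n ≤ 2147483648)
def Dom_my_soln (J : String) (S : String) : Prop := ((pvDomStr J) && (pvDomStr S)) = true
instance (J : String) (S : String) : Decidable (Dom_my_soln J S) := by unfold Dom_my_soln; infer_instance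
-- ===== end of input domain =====

-- B replaces A's Counter-then-traverse with a sum over the DISTINCT jewel characters of J.count(c)*S.count(c); same return value.


-- ===== PORT A =====
-- Counter(S), then sum d[jewel] over J (Counter lookup never raises; the try/except is dead code)
def my_soln (J : String) (S : String) : Int :=
  let d := PySem.Dict.counter S.toList
  J.toList.foldl (fun ans jewel => ans + d.getD jewel 0) 0

-- ===== PORT B =====
-- B: sum(J.count(c) * S.count(c) for c in set(J)); sum over a Python set is order-independent, so
-- iterating PySem.Set.ofList (first-occurrence order) is exact.
def my_soln_alt (J : String) (S : String) : Int :=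
  (PySem.Set.ofList J.toList).foldl
    (fun a c => a + (J.toList.count c : Int) * (S.toList.count c : Int)) 0

-- ===== PRECONDITION & SPEC =====
def Spec_my_soln (J : String) (S : String) (out : Int) : Prop := out = my_soln_alt J S
instance (J : String) (S : String) (out : Int) : Decidable (Spec_my_soln J S out) := by unfold Spec_my_soln; infer_instance

-- ===== CLAIM (what is proved, stated in full; the proofs are below) =====
def Claim_equal_my_soln : Prop := ∀ (J : String) (S : String), Dom_my_soln J S → Spec_my_soln J S (my_soln J S)

-- ===== LEMMAS AND PROOFS =====

-- a fold adding f x is the starting value plus the sum of the mapped list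
theorem pv_foldl_add {f : Char → Int} : ∀ (l : List Char) (c : Int),
    l.foldl (fun a x => a + f x) c = c + (l.map f).sum := by
  intro l
  induction l with
  | nil => intro c; simp
  | cons x xs ih => intro c; rw [List.foldl_cons, ih, List.map_cons, List.sum_cons]; ring

-- the dedup'd set of J has the same members as J, hence the same toFinset
theorem pv_toFinset_ofList (J : List Char) :
    (PySem.Set.ofList J).toFinset = J.toFinset := by
  ext c
  simp [List.mem_toFinset, ← PySem.List.dedup_eq_ofList, PySem.List.mem_dedup]

-- grouping by character value: Σ_{c ∈ set(J)} countJ(c)·countS(c) = Σ_{j ∈ J} countS(j)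
theorem pv_group_by_value (J S : List Char) :
    ((PySem.Set.ofList J).map
        (fun c => (J.count c : Int) * (S.count c : Int))).sum
      = (J.map (fun j => (S.count j : Int))).sum := by
  have hnd : (PySem.Set.ofList J).Nodup := by
    rw [← PySem.List.dedup_eq_ofList]; exact PySem.List.nodup_dedup J
  rw [← List.sum_toFinset _ hnd, pv_toFinset_ofList,
      Finset.sum_list_map_count J (fun j => (S.count j : Int))]
  refine Finset.sum_congr rfl (fun c _ => ?_)
  rw [nsmul_eq_mul]

-- ===== VERDICT =====
theorem my_soln_spec : Claim_equal_my_soln := by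
  intro J S _
  unfold Spec_my_soln my_soln my_soln_alt
  rw [pv_foldl_add, pv_foldl_add, pv_group_by_value]
  refine congrArg (0 + ·) (congrArg List.sum (List.map_congr_left (fun j _ => ?_)))
  rw [PySem.Dict.getD_counter]
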